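-- pv_equiv track=rewrite | github.com/YosefLab/Cassiopeia | SingleCellLineageTracing/ProcessingPipeline/process/sequencing/visualize_structure.py | combine_representations
-- ===== SOURCE A (Python) =====
-- def combine_representations(first_read_positions,
--                             first_lines,
--                             second_read_positions,
--                             second_lines,
--                            ):
--     ''' Combiner to be used during the collapsing process. '''
--     combined_read_positions = first_read_positions | second_read_positions
--     arrays = [[' ' for p in range(len(first_lines[0]))] for l in range(len(first_lines))]
--     for p in first_read_positions:
--         for l, line in enumerate(first_lines):
--             arrays[l][p] = line[p]
--     for p in second_read_positions:
--         for l, line in enumerate(second_lines):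
--             arrays[l][p] = line[p]
--     combined_lines = [''.join(array) for array in arrays]
--     return combined_read_positions, combined_lines
-- ===== SOURCE B (Python) =====
-- def combine_representations(first_read_positions,
--                             first_lines,
--                             second_read_positions,
--                             second_lines,
--                            ):
--     combined_read_positions = first_read_positions | second_read_positions
--     if not first_lines:
--         return combined_read_positions, []
--     width = len(first_lines[0])
--     n2 = len(second_lines)
--     combined_lines = []
--     for l, fline in enumerate(first_lines):
--         cols = {p: fline[p] for p in first_read_positions}
--         if l < n2:
--             sline = second_lines[l]
--             for p in second_read_positions:
--                 cols[p] = sline[p]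
--         combined_lines.append(''.join(cols.get(p, ' ') for p in range(width)))
--     return combined_read_positions, combined_lines
-- ===== Notes on version B (the rewrite author's own statement) =====
-- stated objective: alternative
-- what changed: Drops the mutable space-grid and its two global overwrite passes: each output line is produced independently from one per-row column->char dict (second-read positions overwriting first-read ones) emitted by a single precedence-aware column scan.
-- outside the precondition, e.g. on combine_representations({-1}, ['ab'], set(), []): A returns ({-1}, [' b']), B returns ({-1}, ['  '])
import Mathlib
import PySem

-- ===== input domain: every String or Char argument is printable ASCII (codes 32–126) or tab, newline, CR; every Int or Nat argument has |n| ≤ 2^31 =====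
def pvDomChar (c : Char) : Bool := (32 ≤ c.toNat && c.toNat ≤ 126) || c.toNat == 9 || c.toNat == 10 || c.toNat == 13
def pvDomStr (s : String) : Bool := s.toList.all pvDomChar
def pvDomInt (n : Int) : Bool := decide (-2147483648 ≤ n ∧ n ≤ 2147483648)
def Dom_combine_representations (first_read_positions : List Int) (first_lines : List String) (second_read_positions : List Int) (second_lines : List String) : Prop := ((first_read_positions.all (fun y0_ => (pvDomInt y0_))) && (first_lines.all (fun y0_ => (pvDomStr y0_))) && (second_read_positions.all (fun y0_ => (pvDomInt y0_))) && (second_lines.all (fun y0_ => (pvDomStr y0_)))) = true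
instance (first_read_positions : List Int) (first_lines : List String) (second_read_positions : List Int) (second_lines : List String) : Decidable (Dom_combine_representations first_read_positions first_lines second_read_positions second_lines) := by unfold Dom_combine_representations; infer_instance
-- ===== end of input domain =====

-- B builds each output line independently from a per-row column->char dict emitted in one
-- precedence-aware column scan, instead of A's space-grid mutated by two global overwrite
-- passes (objective: alternative decomposition); equal return values on Pre_.

-- ===== PORT A =====
-- arrays[l][p] = c  (list item assignment; where Python raises, pySetD is the identity — excluded by Pre_)
def pvWrite (g : List (List Char)) (l p : Int) (c : Char) : List (List Char) :=
  PySem.List.pySetD g l (PySem.List.pySetD (PySem.List.pyGetD g l []) p c)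

-- 'for l, line in enumerate(lines): arrays[l][p] = line[p]'
def pvPass (lines : List String) (g : List (List Char)) (p : Int) : List (List Char) :=
  (PySem.List.enumerate lines).foldl
    (fun h ll => pvWrite h ll.1 p ((PySem.Str.pyGet? ll.2 p).getD ' ')) g

-- arrays = [[' ' for p in range(len(first_lines[0]))] for l in range(len(first_lines))]
def pvGrid0 (first_lines : List String) : List (List Char) :=
  (PySem.List.pyRange 0 (first_lines.length : Int) 1).map
    (fun _ => (PySem.List.pyRange 0 (PySem.Str.len (PySem.List.pyGetD first_lines 0 "")) 1).map
      (fun _ => ' '))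

def combine_representations (first_read_positions : List Int) (first_lines : List String) (second_read_positions : List Int) (second_lines : List String) : List Int × List String :=
  let combined := PySem.Set.union first_read_positions second_read_positions
  let arrays1 := first_read_positions.foldl (pvPass first_lines) (pvGrid0 first_lines)
  let arrays2 := second_read_positions.foldl (pvPass second_lines) arrays1
  (combined, arrays2.map (fun a => String.ofList a))

-- ===== PORT B =====
-- the per-row dict 'cols' of Source B: {p: fline[p] for p in first_read_positions},
-- then cols[p] = second_lines[l][p] for p in second_read_positions when l < n2
def pvRowCols (first_read_positions : List Int) (second_read_positions : List Int) (second_lines : List String) (n2 l : Int) (fline : String) : PySem.Dict Int Char :=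
  let cols := first_read_positions.foldl
    (fun d p => PySem.Dict.insert d p ((PySem.Str.pyGet? fline p).getD ' ')) PySem.Dict.empty
  if l < n2 then
    second_read_positions.foldl
      (fun d p => PySem.Dict.insert d p
        ((PySem.Str.pyGet? (PySem.List.pyGetD second_lines l "") p).getD ' ')) cols
  else cols

def combine_representations_alt (first_read_positions : List Int) (first_lines : List String) (second_read_positions : List Int) (second_lines : List String) : List Int × List String :=
  let combined := PySem.Set.union first_read_positions second_read_positions
  if first_lines.isEmpty then (combined, [])
  else
    let width := PySem.Str.len (PySem.List.pyGetD first_lines 0 "")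
    let n2 : Int := second_lines.length
    (combined,
      (PySem.List.enumerate first_lines).foldl (fun acc ll =>
        acc ++ [String.ofList ((PySem.List.pyRange 0 width 1).map
          (fun p => (PySem.Dict.get?
            (pvRowCols first_read_positions second_read_positions second_lines n2 ll.1 ll.2) p).getD ' '))]) [])

-- ===== PRECONDITION & SPEC =====
-- Pre_ excludes, besides all inputs on which A raises, negative read positions reaching a
-- non-empty lines list: there A's value comes from Python's negative-index wraparound and, on
-- ragged line widths, can even depend on the set's hash iteration order, while B addresses
-- columns by their absolute index.
def Pre_combine_representations (first_read_positions : List Int) (first_lines : List String) (second_read_positions : List Int) (second_lines : List String) : Prop :=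
  (∀ p ∈ first_read_positions, first_lines ≠ [] →
      0 ≤ p ∧ p < PySem.Str.len (PySem.List.pyGetD first_lines 0 "") ∧
      ∀ line ∈ first_lines, p < PySem.Str.len line) ∧
  (second_read_positions ≠ [] → second_lines ≠ [] →
      second_lines.length ≤ first_lines.length) ∧
  (∀ p ∈ second_read_positions, second_lines ≠ [] →
      0 ≤ p ∧ p < PySem.Str.len (PySem.List.pyGetD first_lines 0 "") ∧
      ∀ line ∈ second_lines, p < PySem.Str.len line)

instance (first_read_positions : List Int) (first_lines : List String) (second_read_positions : List Int) (second_lines : List String) : Decidable (Pre_combine_representations first_read_positions first_lines second_read_positions second_lines) := by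
  unfold Pre_combine_representations; infer_instance

def pvWitness_combine_representations : List Int × List String × List Int × List String :=
  ([0], ["ab", "cd"], [1], ["xy"])

def Spec_combine_representations (first_read_positions : List Int) (first_lines : List String) (second_read_positions : List Int) (second_lines : List String) (out : List Int × List String) : Prop := out = combine_representations_alt first_read_positions first_lines second_read_positions second_lines
instance (first_read_positions : List Int) (first_lines : List String) (second_read_positions : List Int) (second_lines : List String) (out : List Int × List String) : Decidable (Spec_combine_representations first_read_positions first_lines second_read_positions second_lines out) := by unfold Spec_combine_representations; infer_instance

-- ===== CLAIM (what is proved, stated in full; the proofs are below) =====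
def Claim_equal_combine_representations : Prop := ∀ (first_read_positions : List Int) (first_lines : List String) (second_read_positions : List Int) (second_lines : List String), Dom_combine_representations first_read_positions first_lines second_read_positions second_lines → Pre_combine_representations first_read_positions first_lines second_read_positions second_lines → Spec_combine_representations first_read_positions first_lines second_read_positions second_lines (combine_representations first_read_positions first_lines second_read_positions second_lines)

-- ===== LEMMAS AND PROOFS =====

-- the character of row l, column c of a grid (defaults ' ' out of range)
def pvCell (g : List (List Char)) (l c : Nat) : Char := (g.getD l []).getD c ' '

-- lines[l][p] as both ports read it
def pvCharAt (lines : List String) (l : Nat) (p : Int) : Char :=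
  (PySem.Str.pyGet? (lines.getD l "") p).getD ' '

-- the pass over 'enumerate(lines)' starting at row s (pvPass = pvPassFrom at s = 0)
def pvPassFrom (lines : List String) (p : Int) (s : Int) (g : List (List Char)) : List (List Char) :=
  (PySem.List.enumerate lines s).foldl
    (fun h ll => pvWrite h ll.1 p ((PySem.Str.pyGet? ll.2 p).getD ' ')) g

theorem pvPass_eq (lines : List String) (g : List (List Char)) (p : Int) :
    pvPass lines g p = pvPassFrom lines p 0 g := rfl

theorem pvPassFrom_nil (p s : Int) (g : List (List Char)) :
    pvPassFrom [] p s g = g := by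
  simp [pvPassFrom, PySem.List.enumerate_nil]

theorem pvPassFrom_cons (x : String) (xs : List String) (p s : Int) (g : List (List Char)) :
    pvPassFrom (x :: xs) p s g =
      pvPassFrom xs p (s + 1) (pvWrite g s p ((PySem.Str.pyGet? x p).getD ' ')) := by
  simp [pvPassFrom, PySem.List.enumerate_cons]

theorem pvWrite_eq_set (g : List (List Char)) (l p : Int) (c : Char) (hl : 0 ≤ l) (hp : 0 ≤ p) :
    pvWrite g l p c = g.set l.toNat ((g.getD l.toNat []).set p.toNat c) := by
  unfold pvWrite
  rw [PySem.List.pyGetD_of_nonneg g [] hl, PySem.List.pySetD_of_nonneg _ _ hp,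
    PySem.List.pySetD_of_nonneg _ _ hl]

theorem pvCell_write (g : List (List Char)) (l p : Int) (c : Char) (hl : 0 ≤ l) (hp : 0 ≤ p)
    (l' c' : Nat) :
    pvCell (pvWrite g l p c) l' c' =
      if l' = l.toNat ∧ c' = p.toNat ∧ l.toNat < g.length ∧ p.toNat < (g.getD l.toNat []).length
      then c else pvCell g l' c' := by
  rw [pvWrite_eq_set g l p c hl hp]
  unfold pvCell
  by_cases h1 : l' = l.toNat
  · rw [← h1]
    by_cases h2 : l' < g.length
    · have hrow : (g.set l' ((g.getD l' []).set p.toNat c)).getD l' [] =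
          (g.getD l' []).set p.toNat c := by
        simp [List.getD_eq_getElem?_getD, h2]
      rw [hrow]
      by_cases h3 : c' = p.toNat
      · rw [← h3]
        simp [List.getD_eq_getElem?_getD, List.getElem?_set, h2]
        split_ifs with h5
        · rfl
        · rw [List.getElem?_eq_none (show g[l'].length ≤ c' by omega)]
      · have h3' : p.toNat ≠ c' := fun hh => h3 hh.symm
        simp [List.getD_eq_getElem?_getD, h3, h3']
    · simp [List.getD_eq_getElem?_getD, h2]
  · have h1' : l.toNat ≠ l' := fun hh => h1 hh.symm
    simp [List.getD_eq_getElem?_getD, h1, h1']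

theorem pvCell_blank (g : List (List Char)) (hb : ∀ r ∈ g, ∀ ch ∈ r, ch = ' ') (l c : Nat) :
    pvCell g l c = ' ' := by
  unfold pvCell
  rcases hrow : g[l]? with _ | r
  · simp [List.getD_eq_getElem?_getD, hrow]
  · have hr : r ∈ g := List.mem_of_getElem? hrow
    rcases hch : r[c]? with _ | ch
    · simp [List.getD_eq_getElem?_getD, hrow, hch]
    · have := hb r hr ch (List.mem_of_getElem? hch)
      simp [List.getD_eq_getElem?_getD, hrow, hch, this]

theorem length_pvWrite (g : List (List Char)) (l p : Int) (c : Char) :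
    (pvWrite g l p c).length = g.length := by
  unfold pvWrite; exact PySem.List.length_pySetD ..

theorem length_pvPassFrom (lines : List String) (p : Int) :
    ∀ (s : Int) (g : List (List Char)), (pvPassFrom lines p s g).length = g.length := by
  induction lines with
  | nil => intro s g; rw [pvPassFrom_nil]
  | cons x xs ih => intro s g; rw [pvPassFrom_cons, ih, length_pvWrite]

theorem pvPassFrom_spec (p : Int) (hp : 0 ≤ p) (w : Nat) (hpw : p.toNat < w)
    (lines : List String) : ∀ (s : Nat) (g : List (List Char)),
    (∀ r ∈ g, r.length = w) → s + lines.length ≤ g.length →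
    (∀ r ∈ pvPassFrom lines p (s : Int) g, r.length = w) ∧
    (∀ l c : Nat, pvCell (pvPassFrom lines p (s : Int) g) l c =
      if s ≤ l ∧ l < s + lines.length ∧ c = p.toNat then pvCharAt lines (l - s) p
      else pvCell g l c) := by
  induction lines with
  | nil =>
    intro s g hg _
    rw [pvPassFrom_nil]
    refine ⟨hg, ?_⟩
    intro l c
    rw [if_neg (by rintro ⟨_, h2, _⟩; simp at h2; omega)]
  | cons x xs ih =>
    intro s g hg hlen
    simp only [List.length_cons] at hlen
    have hsg : s < g.length := by omega
    have hrowlen : (g.getD s []).length = w := by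
      rw [List.getD_eq_getElem _ _ hsg]; exact hg _ (List.getElem_mem hsg)
    rw [pvPassFrom_cons]
    have hcast : (s : Int) + 1 = ((s + 1 : Nat) : Int) := by push_cast; ring
    rw [hcast]
    have hg1rows : ∀ r ∈ pvWrite g (s : Int) p ((PySem.Str.pyGet? x p).getD ' '), r.length = w := by
      rw [pvWrite_eq_set _ _ _ _ (Int.natCast_nonneg s) hp]
      intro r hr
      rcases List.mem_or_eq_of_mem_set hr with h | h
      · exact hg r h
      · subst h; rw [List.length_set]; simpa using hrowlen
    have hg1len : (pvWrite g (s : Int) p ((PySem.Str.pyGet? x p).getD ' ')).length = g.length :=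
      length_pvWrite ..
    obtain ⟨ihrows, ihcell⟩ := ih (s + 1)
      (pvWrite g (s : Int) p ((PySem.Str.pyGet? x p).getD ' ')) hg1rows (by omega)
    refine ⟨ihrows, ?_⟩
    intro l c
    rw [ihcell l c]
    have hcw := pvCell_write g (s : Int) p ((PySem.Str.pyGet? x p).getD ' ')
      (Int.natCast_nonneg s) hp l c
    rw [show ((s : Int)).toNat = s from Int.toNat_natCast s] at hcw
    rw [hrowlen] at hcw
    simp only [List.length_cons]
    by_cases hc : c = p.toNat
    · by_cases h5 : s + 1 ≤ l ∧ l < s + 1 + xs.length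
      · rw [if_pos ⟨h5.1, h5.2, hc⟩, if_pos ⟨by omega, by omega, hc⟩]
        unfold pvCharAt
        rw [show l - s = (l - (s + 1)) + 1 by omega, List.getD_cons_succ]
      · by_cases h6 : l = s
        · subst h6
          rw [if_neg (by omega), hcw, if_pos ⟨rfl, hc, hsg, hpw⟩,
            if_pos ⟨le_refl l, by omega, hc⟩]
          unfold pvCharAt
          rw [Nat.sub_self, List.getD_cons_zero]
        · rw [if_neg (by omega), hcw, if_neg (by rintro ⟨hh, _⟩; exact h6 hh),
            if_neg (by omega)]
    · rw [if_neg (fun h => hc h.2.2), hcw, if_neg (fun h => hc h.2.1),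
        if_neg (fun h => hc h.2.2)]

theorem pvFoldPass (lines : List String) (w : Nat) (ps : List Int)
    (hps : ∀ p ∈ ps, 0 ≤ p ∧ p.toNat < w) : ∀ (g : List (List Char)),
    (∀ r ∈ g, r.length = w) → lines.length ≤ g.length →
    (ps.foldl (pvPass lines) g).length = g.length ∧
    (∀ r ∈ ps.foldl (pvPass lines) g, r.length = w) ∧
    (∀ l c : Nat, pvCell (ps.foldl (pvPass lines) g) l c =
      if l < lines.length ∧ (c : Int) ∈ ps then pvCharAt lines l (c : Int)
      else pvCell g l c) := by
  induction ps with
  | nil =>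
    intro g hg _
    refine ⟨rfl, hg, ?_⟩
    intro l c
    rw [if_neg (by rintro ⟨_, hm⟩; simp at hm)]
    rfl
  | cons q qs ih =>
    intro g hg hlen
    obtain ⟨hq0, hqw⟩ := hps q (List.mem_cons_self ..)
    have h0 := pvPassFrom_spec q hq0 w hqw lines 0 g hg (by omega)
    rw [Nat.cast_zero] at h0
    obtain ⟨h0rows, h0cell⟩ := h0
    have h0len : (pvPassFrom lines q 0 g).length = g.length := length_pvPassFrom ..
    simp only [List.foldl_cons, pvPass_eq]
    obtain ⟨ihlen, ihrows, ihcell⟩ := ih (fun p hp => hps p (List.mem_cons_of_mem _ hp))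
      (pvPassFrom lines q 0 g) h0rows (by omega)
    refine ⟨by rw [ihlen, h0len], ihrows, ?_⟩
    intro l c
    rw [ihcell l c]
    by_cases hl : l < lines.length
    · by_cases hm : (c : Int) ∈ qs
      · rw [if_pos ⟨hl, hm⟩, if_pos ⟨hl, List.mem_cons_of_mem _ hm⟩]
      · by_cases hqc : (c : Int) = q
        · rw [if_neg (fun h => hm h.2), h0cell l c,
            if_pos ⟨by omega, by omega, by omega⟩,
            if_pos ⟨hl, by rw [hqc]; exact List.mem_cons_self ..⟩]
          unfold pvCharAt
          rw [Nat.sub_zero, hqc]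
        · rw [if_neg (fun h => hm h.2), h0cell l c,
            if_neg (by rintro ⟨_, _, hh⟩; omega),
            if_neg (by rintro ⟨_, hh⟩; rcases List.mem_cons.mp hh with h | h
                       · exact hqc h
                       · exact hm h)]
    · rw [if_neg (fun h => hl h.1), h0cell l c, if_neg (by rintro ⟨_, hh, _⟩; omega),
        if_neg (fun h => hl h.1)]

theorem pvFoldPass_nil_lines (ps : List Int) (g : List (List Char)) :
    ps.foldl (pvPass ([] : List String)) g = g := by
  induction ps generalizing g with
  | nil => rfl
  | cons q qs ih => simp only [List.foldl_cons, pvPass_eq, pvPassFrom_nil, ih]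

theorem pvWrite_empty (l p : Int) (c : Char) : pvWrite ([] : List (List Char)) l p c = [] := by
  have hnone : ∀ v : List Char, PySem.List.pySet? ([] : List (List Char)) l v = none := by
    intro v
    rw [PySem.List.pySet?_eq_none_iff]
    simp [PySem.Raise.InRange]
  unfold pvWrite
  simp [PySem.List.pySetD, hnone]

theorem pvPass_empty_grid (lines : List String) (ps : List Int) :
    ps.foldl (pvPass lines) ([] : List (List Char)) = [] := by
  have hpass : ∀ p, pvPass lines ([] : List (List Char)) p = [] := by
    intro p
    rw [pvPass_eq]
    have : ∀ (es : List (Int × String)),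
        es.foldl (fun h ll => pvWrite h ll.1 p ((PySem.Str.pyGet? ll.2 p).getD ' '))
          ([] : List (List Char)) = [] := by
      intro es
      induction es with
      | nil => rfl
      | cons e es ihe => simp only [List.foldl_cons, pvWrite_empty, ihe]
    exact this _
  induction ps with
  | nil => rfl
  | cons q qs ih => simp only [List.foldl_cons, hpass, ih]

theorem pvGet?_foldIns (ps : List Int) (f : Int → Char) (d : PySem.Dict Int Char) (c : Int) :
    (ps.foldl (fun d p => PySem.Dict.insert d p (f p)) d).get? c
      = if c ∈ ps then some (f c) else d.get? c := by
  induction ps generalizing d with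
  | nil => simp
  | cons q qs ih =>
    rw [List.foldl_cons, ih]
    by_cases hm : c ∈ qs
    · rw [if_pos hm, if_pos (List.mem_cons_of_mem _ hm)]
    · rw [if_neg hm, PySem.Dict.get?_insert]
      by_cases hq : c = q
      · rw [if_pos hq, if_pos (by rw [hq]; exact List.mem_cons_self ..), hq]
      · rw [if_neg hq, if_neg (by
          rintro h
          rcases List.mem_cons.mp h with h | h
          exacts [hq h, hm h])]

-- ===== VERDICT (by name: the statement is the Claim_ definition above) =====
theorem combine_representations_spec : Claim_equal_combine_representations := by
  intro fpos flines spos slines _ hpre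
  obtain ⟨h1, h2, h3⟩ := hpre
  unfold Spec_combine_representations
  simp only [combine_representations, combine_representations_alt]
  by_cases hfl : flines = []
  · subst hfl
    have hg0 : pvGrid0 ([] : List String) = [] := by
      simp [pvGrid0, PySem.List.pyRange_one_eq_nil]
    rw [hg0, pvPass_empty_grid, pvPass_empty_grid]
    simp
  · have hne : flines.isEmpty = false := by
      rcases flines with _ | _
      · exact absurd rfl hfl
      · rfl
    rw [hne]
    simp only [Bool.false_eq_true, if_false]
    obtain ⟨w, hWw⟩ : ∃ n : Nat, PySem.Str.len (PySem.List.pyGetD flines 0 "") = (n : Int) :=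
      ⟨(PySem.List.pyGetD flines 0 "").toList.length, PySem.Str.len_eq _⟩
    have hlen0 : (pvGrid0 flines).length = flines.length := by
      simp [pvGrid0, PySem.List.length_pyRange_one]
    have hrows0 : ∀ r ∈ pvGrid0 flines, r.length = w := by
      intro r hr
      simp only [pvGrid0, List.mem_map] at hr
      obtain ⟨a, _, rfl⟩ := hr
      rw [List.length_map, PySem.List.length_pyRange_one, hWw]
      omega
    have hblank0 : ∀ r ∈ pvGrid0 flines, ∀ ch ∈ r, ch = ' ' := by
      intro r hr ch hch
      simp only [pvGrid0, List.mem_map] at hr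
      obtain ⟨a, _, rfl⟩ := hr
      simp only [List.mem_map] at hch
      obtain ⟨b, _, rfl⟩ := hch
      rfl
    have hfb : ∀ p ∈ fpos, 0 ≤ p ∧ p.toNat < w := by
      intro p hp
      obtain ⟨hp0, hpW, _⟩ := h1 p hp hfl
      omega
    obtain ⟨hlen1, hrows1, hcell1⟩ :=
      pvFoldPass flines w fpos hfb (pvGrid0 flines) hrows0 (by omega)
    have hcell1' : ∀ l c : Nat,
        pvCell (fpos.foldl (pvPass flines) (pvGrid0 flines)) l c =
          if l < flines.length ∧ (c : Int) ∈ fpos then pvCharAt flines l (c : Int) else ' ' := by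
      intro l c
      rw [hcell1 l c, pvCell_blank _ hblank0 l c]
    -- the second pass
    have harr2 :
        ((spos.foldl (pvPass slines) (fpos.foldl (pvPass flines) (pvGrid0 flines))).length
            = flines.length) ∧
        (∀ r ∈ spos.foldl (pvPass slines) (fpos.foldl (pvPass flines) (pvGrid0 flines)),
            r.length = w) ∧
        (∀ l c : Nat,
          pvCell (spos.foldl (pvPass slines) (fpos.foldl (pvPass flines) (pvGrid0 flines))) l c =
            if l < slines.length ∧ (c : Int) ∈ spos then pvCharAt slines l (c : Int)
            else pvCell (fpos.foldl (pvPass flines) (pvGrid0 flines)) l c) := by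
      by_cases hsp : spos = []
      · subst hsp
        refine ⟨by rw [List.foldl_nil]; omega, by rw [List.foldl_nil]; exact hrows1, ?_⟩
        intro l c
        rw [List.foldl_nil, if_neg (by rintro ⟨_, hm⟩; simp at hm)]
      · by_cases hsl : slines = []
        · subst hsl
          rw [pvFoldPass_nil_lines]
          refine ⟨by omega, hrows1, ?_⟩
          intro l c
          rw [if_neg (by rintro ⟨hm, _⟩; simp at hm)]
        · have hsb : ∀ p ∈ spos, 0 ≤ p ∧ p.toNat < w := by
            intro p hp
            obtain ⟨hp0, hpW, _⟩ := h3 p hp hsl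
            omega
          have hslen : slines.length ≤ flines.length := h2 hsp hsl
          obtain ⟨hl2, hr2, hc2⟩ := pvFoldPass slines w spos hsb
            (fpos.foldl (pvPass flines) (pvGrid0 flines)) hrows1 (by omega)
          exact ⟨by omega, hr2, hc2⟩
    obtain ⟨hlen2, hrows2, hcell2⟩ := harr2
    set A2 := spos.foldl (pvPass slines) (fpos.foldl (pvPass flines) (pvGrid0 flines)) with hA2
    congr 1
    rw [PySem.List.foldl_append_singleton_eq_map, List.nil_append]
    apply List.ext_getElem
    · simp [hlen2, PySem.List.length_enumerate]
    · intro i hi1 hi2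
      simp only [List.length_map] at hi1 hi2
      rw [PySem.List.length_enumerate] at hi2
      have hiN : i < flines.length := hi2
      rw [List.getElem_map, List.getElem_map, PySem.List.getElem_enumerate]
      dsimp only
      congr 1
      have hr2 : A2[i].length = w := hrows2 _ (List.getElem_mem hi1)
      apply List.ext_getElem
      · simp only [List.length_map, PySem.List.length_pyRange_one]
        omega
      · intro c hc1 hc2
        simp only [List.length_map, PySem.List.length_pyRange_one] at hc2
        have hcw : c < w := by omega
        have hcell : A2[i][c] = pvCell A2 i c := by
          unfold pvCell
          rw [List.getD_eq_getElem A2 [] hi1, List.getD_eq_getElem _ ' ' (by omega)]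
        rw [hcell, hcell2 i c, hcell1' i c, List.getElem_map, PySem.List.getElem_pyRange_one]
        unfold pvRowCols
        simp only [zero_add]
        by_cases hls : i < slines.length
        · rw [if_pos (show ((i : Nat) : Int) < ((slines.length : Nat) : Int) by exact_mod_cast hls)]
          simp only [pvGet?_foldIns, PySem.Dict.get?_empty]
          by_cases hsm : ((c : Nat) : Int) ∈ spos
          · rw [if_pos ⟨hls, hsm⟩, if_pos hsm]
            unfold pvCharAt
            simp [PySem.List.pyGetD_natCast]
          · rw [if_neg (fun h => hsm h.2), if_neg hsm]
            by_cases hfm : ((c : Nat) : Int) ∈ fpos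
            · rw [if_pos ⟨hiN, hfm⟩, if_pos hfm]
              unfold pvCharAt
              rw [List.getD_eq_getElem flines "" hiN]
              simp
            · rw [if_neg (fun h => hfm h.2), if_neg hfm]
              rfl
        · rw [if_neg (show ¬ ((i : Nat) : Int) < ((slines.length : Nat) : Int) by exact_mod_cast hls)]
          simp only [pvGet?_foldIns, PySem.Dict.get?_empty]
          rw [if_neg (fun h => hls h.1)]
          by_cases hfm : ((c : Nat) : Int) ∈ fpos
          · rw [if_pos ⟨hiN, hfm⟩, if_pos hfm]
            unfold pvCharAt
            rw [List.getD_eq_getElem flines "" hiN]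
            simp
          · rw [if_neg (fun h => hfm h.2), if_neg hfm]
            rfl
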